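-- pv_equiv track=rewrite | github.com/RedBlazerFlame/noi-2023-training-solutions | w7/insane/3/s2cons.py | cities
-- ===== SOURCE A (Python) =====
-- def cities(b, a):
--     # grid = list(map(lambda j: list(map(lambda i: "-", range(b))), range(a)))
--     cities = []
--     for i in range(b):
--         for j in range(a):
--             ni = b - i - 1 if i >= (b >> 1) else i
--             nj = a - j - 1 if j >= (a >> 1) else j
--
--
--             cities.append(1 if ni == nj else 0)
--     return cities
-- ===== SOURCE B (Python) =====
-- def cities(b, a):
--     if b <= 0 or a <= 0:
--         return []
--     out = [0] * (b * a)
--     half = (a - 1) // 2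
--     for i in range(b):
--         ni = b - i - 1 if i >= b // 2 else i
--         if ni <= half:
--             out[i * a + ni] = 1
--             out[i * a + (a - 1 - ni)] = 1
--     return out
-- ===== Notes on version B (the rewrite author's own statement) =====
-- stated objective: faster
-- what changed: Instead of testing the fold condition for every one of the b*a cells, B allocates the whole grid as zeros in one bulk operation and, per row, directly writes 1 into the at most two columns (ni and a-1-ni) that can match, skipping rows whose folded index exceeds (a-1)//2.
import Mathlib
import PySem

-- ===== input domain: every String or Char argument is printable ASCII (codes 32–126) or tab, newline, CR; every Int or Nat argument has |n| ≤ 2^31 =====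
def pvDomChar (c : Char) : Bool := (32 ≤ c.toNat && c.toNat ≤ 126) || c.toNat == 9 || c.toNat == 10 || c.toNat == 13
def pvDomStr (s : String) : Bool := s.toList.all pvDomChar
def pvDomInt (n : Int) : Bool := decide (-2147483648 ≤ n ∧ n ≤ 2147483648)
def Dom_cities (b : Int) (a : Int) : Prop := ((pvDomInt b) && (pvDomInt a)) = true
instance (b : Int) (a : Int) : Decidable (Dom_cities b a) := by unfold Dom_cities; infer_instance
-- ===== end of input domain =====

-- B replaces A's per-cell fold test (b*a tests) by allocating a zero grid and directly
-- marking the at most two matching columns of each row: objective 'faster' (fewer operations per row).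

-- ===== PORT A =====
-- Python 'b >> 1' on an int is floor division by 2: PySem.Int.floordiv b 2 (exact).
def cities (b : Int) (a : Int) : List Int :=
  (PySem.List.pyRange 0 b 1).foldl (fun acc i =>
    (PySem.List.pyRange 0 a 1).foldl (fun acc2 j =>
      let ni := if i ≥ PySem.Int.floordiv b 2 then b - i - 1 else i
      let nj := if j ≥ PySem.Int.floordiv a 2 then a - j - 1 else j
      acc2 ++ [if ni = nj then (1 : Int) else 0]) acc) []

-- ===== PORT B =====
-- out[k] = 1 (always in range here) is PySem.List.pySetD; [0]*(b*a) is List.replicate.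
def cities_alt (b : Int) (a : Int) : List Int :=
  if b ≤ 0 ∨ a ≤ 0 then []
  else
    let half := PySem.Int.floordiv (a - 1) 2
    (PySem.List.pyRange 0 b 1).foldl (fun out i =>
      let ni := if i ≥ PySem.Int.floordiv b 2 then b - i - 1 else i
      if ni ≤ half then
        PySem.List.pySetD (PySem.List.pySetD out (i * a + ni) 1) (i * a + (a - 1 - ni)) 1
      else out)
      (List.replicate (b * a).toNat 0)

-- ===== PRECONDITION & SPEC =====
def Spec_cities (b : Int) (a : Int) (out : List Int) : Prop := out = cities_alt b a
instance (b : Int) (a : Int) (out : List Int) : Decidable (Spec_cities b a out) := by unfold Spec_cities; infer_instance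

-- ===== CLAIM (what is proved, stated in full; the proofs are below) =====
def Claim_equal_cities : Prop := ∀ (b : Int) (a : Int), Dom_cities b a → Spec_cities b a (cities b a)

-- ===== LEMMAS AND PROOFS =====

-- the index fold both programs apply (to rows with n = b, to columns with n = a)
def pvNi (n i : Int) : Int := if i ≥ PySem.Int.floordiv n 2 then n - i - 1 else i

-- row i as A produces it
def pvRowA (b a i : Int) : List Int :=
  (PySem.List.pyRange 0 a 1).map (fun j => if pvNi b i = pvNi a j then (1 : Int) else 0)

-- row i as B produces it
def pvRowB (b a i : Int) : List Int :=
  if pvNi b i ≤ PySem.Int.floordiv (a - 1) 2 then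
    ((List.replicate a.toNat (0 : Int)).set (pvNi b i).toNat 1).set (a - 1 - pvNi b i).toNat 1
  else List.replicate a.toNat 0

lemma pvA_flat (b a : Int) (l : List Int) (init : List Int) :
    l.foldl (fun acc i =>
      (PySem.List.pyRange 0 a 1).foldl (fun acc2 j =>
        let ni := if i ≥ PySem.Int.floordiv b 2 then b - i - 1 else i
        let nj := if j ≥ PySem.Int.floordiv a 2 then a - j - 1 else j
        acc2 ++ [if ni = nj then (1 : Int) else 0]) acc) init
    = init ++ l.flatMap (pvRowA b a) := by
  induction l generalizing init with
  | nil => simp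
  | cons x xs ih =>
      simp only [List.foldl_cons, List.flatMap_cons, ih]
      rw [PySem.List.foldl_append_singleton_eq_map]
      simp [pvRowA, pvNi, List.append_assoc]

lemma pvRowB_length (b a i : Int) : (pvRowB b a i).length = a.toNat := by
  unfold pvRowB; split <;> simp

lemma pvB_step (b a i : Int) (k : Nat) (ha : 0 < a) (hi0 : 0 ≤ i) (hib : i < b)
    (pre : List Int) (hpre : pre.length = (i * a).toNat) :
    (let ni := if i ≥ PySem.Int.floordiv b 2 then b - i - 1 else i
     if ni ≤ PySem.Int.floordiv (a - 1) 2 then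
       PySem.List.pySetD (PySem.List.pySetD (pre ++ List.replicate ((k + 1) * a.toNat) 0) (i * a + ni) 1)
         (i * a + (a - 1 - ni)) 1
     else pre ++ List.replicate ((k + 1) * a.toNat) 0)
    = (pre ++ pvRowB b a i) ++ List.replicate (k * a.toNat) 0 := by
  have hfa1 : PySem.Int.floordiv (a - 1) 2 = (a - 1) / 2 := PySem.Int.floordiv_eq_ediv_of_pos (by omega)
  have hrep : List.replicate ((k + 1) * a.toNat) (0 : Int)
      = List.replicate a.toNat 0 ++ List.replicate (k * a.toNat) 0 := by
    rw [← List.replicate_add]; congr 1; ring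
  have hpv : pvNi b i = if i ≥ PySem.Int.floordiv b 2 then b - i - 1 else i := rfl
  simp only
  rw [← hpv]
  have hni0 : 0 ≤ pvNi b i := by rw [hpv]; split <;> omega
  by_cases h : pvNi b i ≤ PySem.Int.floordiv (a - 1) 2
  · rw [if_pos h]
    rw [hfa1] at h
    have hia : 0 ≤ i * a := mul_nonneg hi0 ha.le
    have hni1 : pvNi b i ≤ a - 1 := by omega
    rw [PySem.List.pySetD_of_nonneg _ _ (show (0:Int) ≤ i * a + pvNi b i by omega),
        PySem.List.pySetD_of_nonneg _ _ (show (0:Int) ≤ i * a + (a - 1 - pvNi b i) by omega)]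
    rw [hrep]
    rw [List.set_append_right (s := pre) _ _ (by omega)]
    rw [List.set_append_right (s := pre) _ _ (by omega)]
    have e1 : (i * a + pvNi b i).toNat - pre.length = (pvNi b i).toNat := by omega
    have e2 : (i * a + (a - 1 - pvNi b i)).toNat - pre.length = (a - 1 - pvNi b i).toNat := by omega
    rw [e1, e2]
    rw [List.set_append_left _ _ (by simp; omega)]
    rw [List.set_append_left _ _ (by simp; omega)]
    rw [pvRowB, if_pos (by rw [hfa1]; exact h)]
    simp [List.append_assoc]
  · rw [if_neg h]
    rw [hrep, ← List.append_assoc]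
    rw [pvRowB, if_neg h, List.append_assoc]


lemma pvB_inv (b a : Int) (ha : 0 < a) :
    ∀ (k : Nat) (i : Int), 0 ≤ i → i + k = b →
    ∀ (pre : List Int), pre.length = (i * a).toNat →
    (PySem.List.pyRange i b 1).foldl (fun out i =>
        let ni := if i ≥ PySem.Int.floordiv b 2 then b - i - 1 else i
        if ni ≤ PySem.Int.floordiv (a - 1) 2 then
          PySem.List.pySetD (PySem.List.pySetD out (i * a + ni) 1) (i * a + (a - 1 - ni)) 1
        else out)
      (pre ++ List.replicate (k * a.toNat) 0)
    = pre ++ (PySem.List.pyRange i b 1).flatMap (pvRowB b a) := by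
  intro k
  induction k with
  | zero =>
      intro i hi0 hik pre hpre
      have : i = b := by omega
      subst this
      rw [PySem.List.pyRange_one_eq_nil le_rfl]
      simp
  | succ k ih =>
      intro i hi0 hik pre hpre
      have hib : i < b := by omega
      rw [PySem.List.pyRange_one_cons hib, List.foldl_cons, List.flatMap_cons]
      rw [pvB_step b a i k ha hi0 hib pre hpre]
      rw [ih (i + 1) (by omega) (by omega) (pre ++ pvRowB b a i)
        (by simp [hpre, pvRowB_length]; have : 0 ≤ i * a := mul_nonneg hi0 ha.le; ring_nf; omega)]
      simp [List.append_assoc]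

lemma pvRow_eq (b a i : Int) (ha : 0 < a) (hi0 : 0 ≤ i) (hib : i < b) :
    pvRowA b a i = pvRowB b a i := by
  have hfa : PySem.Int.floordiv a 2 = a / 2 := PySem.Int.floordiv_eq_ediv_of_pos (by omega)
  have hfb : PySem.Int.floordiv b 2 = b / 2 := PySem.Int.floordiv_eq_ediv_of_pos (by omega)
  have hfa1 : PySem.Int.floordiv (a - 1) 2 = (a - 1) / 2 := PySem.Int.floordiv_eq_ediv_of_pos (by omega)
  apply List.ext_getElem
  · simp [pvRowA, pvRowB, PySem.List.length_pyRange_one]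
    split <;> simp
  · intro j hj1 hj2
    have hjlen : j < a.toNat := by
      simpa [pvRowA, PySem.List.length_pyRange_one] using hj1
    simp only [pvRowA, List.getElem_map, PySem.List.getElem_pyRange_one, pvRowB, pvNi,
      hfa, hfb, hfa1]
    split <;> split <;> split <;> split <;>
      (simp only [List.getElem_set, List.getElem_replicate] <;>
        first
          | (split_ifs <;> omega)
          | omega)

-- ===== VERDICT (by name: the statement is the Claim_ definition above) =====
theorem cities_spec : Claim_equal_cities := by
  intro b a _
  show cities b a = cities_alt b a
  by_cases hb : b ≤ 0
  · unfold cities cities_alt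
    rw [PySem.List.pyRange_one_eq_nil hb, if_pos (Or.inl hb)]
    simp
  by_cases ha : a ≤ 0
  · unfold cities cities_alt
    rw [PySem.List.pyRange_one_eq_nil ha, if_pos (Or.inr ha)]
    simp
  rw [not_le] at hb ha
  have hA : cities b a = (PySem.List.pyRange 0 b 1).flatMap (pvRowA b a) := by
    unfold cities; rw [pvA_flat]; simp
  have hrows : (PySem.List.pyRange 0 b 1).flatMap (pvRowA b a)
      = (PySem.List.pyRange 0 b 1).flatMap (pvRowB b a) := by
    simp only [List.flatMap_def]
    congr 1
    apply List.map_congr_left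
    intro i hi
    rw [PySem.List.mem_pyRange_one] at hi
    exact pvRow_eq b a i ha hi.1 hi.2
  have hB : cities_alt b a = (PySem.List.pyRange 0 b 1).flatMap (pvRowB b a) := by
    unfold cities_alt
    rw [if_neg (by omega)]
    have := pvB_inv b a ha b.toNat 0 le_rfl (by omega) [] (by simp)
    simpa [Int.toNat_mul, hb.le, ha.le] using this
  rw [hA, hrows, hB]
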